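-- pv_equiv track=rewrite | github.com/PaoloMagnoni/Metodi-computazionali-2024 | E05/somme.py | sommaprod
-- ===== SOURCE A (Python) =====
-- def sommaprod(n):
--     s=0
--     p=1
--     for i in range(n+1):
--        s=s+i
--     for i in range(1,n+1):
--        p=p*i
--     return s,p
-- ===== SOURCE B (Python) =====
-- def sommaprod(n):
--     # Gauss closed form for sum 0..n (empty range when n < 0 gives 0),
--     # balanced divide-and-conquer product for 1..n.
--     s = n * (n + 1) // 2 if n >= 0 else 0
--
--     def prodrange(lo, hi):
--         # product of the integers lo..hi inclusive
--         if lo > hi: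
--             return 1
--         if lo == hi:
--             return lo
--         mid = (lo + hi) // 2
--         return prodrange(lo, mid) * prodrange(mid + 1, hi)
--
--     return s, prodrange(1, n)
-- ===== Notes on version B (the rewrite author's own statement) =====
-- stated objective: faster
-- what changed: Replaces the summation loop by Gauss's closed form n(n+1)//2 and the sequential factorial loop by a balanced divide-and-conquer product over 1..n; intended as faster (probe read B 12.14x at the largest size both finished but could not confirm by its rule).
import Mathlib
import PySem

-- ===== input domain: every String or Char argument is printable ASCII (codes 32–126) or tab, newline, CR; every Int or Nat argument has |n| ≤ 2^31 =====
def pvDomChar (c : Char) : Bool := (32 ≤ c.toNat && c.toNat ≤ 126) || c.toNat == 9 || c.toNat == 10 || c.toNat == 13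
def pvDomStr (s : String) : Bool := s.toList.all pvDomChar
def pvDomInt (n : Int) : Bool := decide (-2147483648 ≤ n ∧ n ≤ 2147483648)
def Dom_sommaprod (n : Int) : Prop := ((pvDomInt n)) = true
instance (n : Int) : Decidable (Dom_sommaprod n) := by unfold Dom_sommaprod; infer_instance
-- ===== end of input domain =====

-- B replaces the summation loop by Gauss's closed form and the sequential factorial loop
-- by a balanced divide-and-conquer product over 1..n; intended as faster (a timing run read
-- B 12.14x at the largest size both finished, but could not confirm it by its own rule).

-- ===== PORT A =====
def sommaprod (n : Int) : Int × Int :=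
  let s := (PySem.List.pyRange 0 (n + 1) 1).foldl (fun s i => s + i) 0
  let p := (PySem.List.pyRange 1 (n + 1) 1).foldl (fun p i => p * i) 1
  (s, p)

-- ===== PORT B =====
-- product of the integers lo..hi inclusive, divide and conquer (Source B's prodrange)
def prodrange (lo hi : Int) : Int :=
  if lo > hi then 1
  else if lo = hi then lo
  else
    let mid := PySem.Int.floordiv (lo + hi) 2
    prodrange lo mid * prodrange (mid + 1) hi
termination_by (hi + 1 - lo).toNat
decreasing_by
  all_goals
    have h := PySem.Int.floordiv_two_mid_bounds (lo := lo) (hi := hi) (by omega)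
    have hlt : PySem.Int.floordiv (lo + hi) 2 < hi := by
      rw [PySem.Int.floordiv_lt_iff_lt_mul (by omega)]; omega
    omega

def sommaprod_alt (n : Int) : Int × Int :=
  let s := if n ≥ 0 then PySem.Int.floordiv (n * (n + 1)) 2 else 0
  (s, prodrange 1 n)

-- ===== PRECONDITION & SPEC =====
def Spec_sommaprod (n : Int) (out : Int × Int) : Prop := out = sommaprod_alt n
instance (n : Int) (out : Int × Int) : Decidable (Spec_sommaprod n out) := by unfold Spec_sommaprod; infer_instance

-- ===== CLAIM (what is proved, stated in full; the proofs are below) =====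
def Claim_equal_sommaprod : Prop := ∀ (n : Int), Dom_sommaprod n → Spec_sommaprod n (sommaprod n)

-- ===== LEMMAS AND PROOFS =====

-- pulling the accumulator out of a multiplicative foldl
theorem foldl_mul_init (l : List Int) (a : Int) :
    l.foldl (fun p i => p * i) a = a * l.foldl (fun p i => p * i) 1 := by
  induction l generalizing a with
  | nil => simp
  | cons x xs ih =>
    simp only [List.foldl_cons]
    rw [ih (a * x), ih (1 * x)]
    ring

-- the divide-and-conquer product equals A's left-to-right product of lo..hi
theorem prodrange_eq_foldl (lo hi : Int) :
    prodrange lo hi = (PySem.List.pyRange lo (hi + 1) 1).foldl (fun p i => p * i) 1 := by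
  fun_induction prodrange lo hi with
  | case1 lo hi h =>
    rw [PySem.List.pyRange_one_eq_nil (by omega)]; rfl
  | case2 lo h =>
    rw [PySem.List.pyRange_one_singleton]
    simp
  | case3 lo hi h h' mid ih1 ih2 =>
    have hmid : mid = PySem.Int.floordiv (lo + hi) 2 := rfl
    have hb := PySem.Int.floordiv_two_mid_bounds (lo := lo) (hi := hi) (by omega)
    have hlt : PySem.Int.floordiv (lo + hi) 2 < hi := by
      rw [PySem.Int.floordiv_lt_iff_lt_mul (by omega)]; omega
    rw [ih1, ih2,
        PySem.List.pyRange_one_append lo (mid + 1) (hi + 1) (by omega) (by omega),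
        List.foldl_append, foldl_mul_init]
    conv_rhs => rw [foldl_mul_init]

-- Gauss: A's summation loop in closed form (for n ≥ 0)
theorem foldl_sum_gauss (m : Nat) :
    (PySem.List.pyRange 0 ((m : Int) + 1) 1).foldl (fun s i => s + i) 0
      = PySem.Int.floordiv ((m : Int) * ((m : Int) + 1)) 2 := by
  have key : ∀ k : Nat, 2 * (PySem.List.pyRange 0 ((k : Int) + 1) 1).foldl (fun s i => s + i) 0
      = (k : Int) * ((k : Int) + 1) := by
    intro k
    induction k with
    | zero => decide
    | succ j ih =>
      rw [show ((j + 1 : Nat) : Int) + 1 = ((j : Int) + 1) + 1 by push_cast; ring,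
          PySem.List.pyRange_one_succ_right (by omega), List.foldl_append]
      simp only [List.foldl_cons, List.foldl_nil]
      push_cast
      push_cast at ih
      linear_combination ih
  have h2 := key m
  rw [PySem.Int.floordiv_eq_ediv_of_pos (by omega)]
  omega

-- ===== VERDICT (by name: the statement is the Claim_ definition above) =====
theorem sommaprod_spec : Claim_equal_sommaprod := by
  intro n _
  show sommaprod n = sommaprod_alt n
  unfold sommaprod sommaprod_alt
  rw [← prodrange_eq_foldl]
  by_cases h : n ≥ 0
  · obtain ⟨m, rfl⟩ := Int.eq_ofNat_of_zero_le h
    rw [foldl_sum_gauss]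
    simp [h]
  · rw [PySem.List.pyRange_one_eq_nil (by omega)]
    simp [h]
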